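-- pv_equiv track=rewrite | github.com/Aleksandr-biochem/EpitopeScan | utils/SeqAnalysis.py | CheckFrameDisruption
-- ===== SOURCE A (Python) =====
-- def CheckFrameDisruption(orf_start, orf_end, genome_sequence):
--     """
--     Check if the ORF in sample genome is disrupted by deletions
--
--     orf_start - int, ORF start coordinate in genome
--     orf_end - int, ORF end coordinate in genome
--     genome_sequence - str, sample genome sequence
--
--     Returns:
--     bool, True if frame is disrupted
--     """
--
--     # get ORF sequence
--     ORF_sequence = genome_sequence[orf_start - 1:orf_end]
--
--     # check start and stop codons mutations
--     if ORF_sequence[:3] != 'ATG':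
--         frame_disrupted = True
--         return frame_disrupted
--     if not ORF_sequence[-3:] in ['TAA', 'TGA', 'TAG']:
--         frame_disrupted = True
--         return frame_disrupted
--
--     # check deletions disrupting the frame
--     # we are looking for deletions with length != 3n
--     frame_disrupted = False
--     if '-' in ORF_sequence:
--         len_gap = 0
--         for base in ORF_sequence:
--             if base == '-':
--                 len_gap += 1
--             elif len_gap > 0:
--                 if len_gap % 3 > 0:
--                     frame_disrupted = True
--                     break
--                 else:
--                     len_gap = 0
--
--     return frame_disrupted
-- ===== SOURCE B (Python) =====
-- def CheckFrameDisruption(orf_start, orf_end, genome_sequence):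
--     orf = genome_sequence[orf_start - 1:orf_end]
--     if orf[:3] != 'ATG':
--         return True
--     if orf[-3:] not in ['TAA', 'TGA', 'TAG']:
--         return True
--     # positions of retained (non-deleted) bases; a gap run that is followed by a
--     # base shows up as a jump between consecutive positions
--     pos = [i for i, base in enumerate(orf) if base != '-']
--     return any((b - a) % 3 != 1 for a, b in zip([-1] + pos, pos))
-- ===== Notes on version B (the rewrite author's own statement) =====
-- stated objective: alternative
-- what changed: Replaces A's single stateful scan (len_gap counter with break) by first collecting the indices of retained (non-'-') bases and then checking that every jump between consecutive retained positions is 1 modulo 3; the codon guards are kept verbatim.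
import Mathlib
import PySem

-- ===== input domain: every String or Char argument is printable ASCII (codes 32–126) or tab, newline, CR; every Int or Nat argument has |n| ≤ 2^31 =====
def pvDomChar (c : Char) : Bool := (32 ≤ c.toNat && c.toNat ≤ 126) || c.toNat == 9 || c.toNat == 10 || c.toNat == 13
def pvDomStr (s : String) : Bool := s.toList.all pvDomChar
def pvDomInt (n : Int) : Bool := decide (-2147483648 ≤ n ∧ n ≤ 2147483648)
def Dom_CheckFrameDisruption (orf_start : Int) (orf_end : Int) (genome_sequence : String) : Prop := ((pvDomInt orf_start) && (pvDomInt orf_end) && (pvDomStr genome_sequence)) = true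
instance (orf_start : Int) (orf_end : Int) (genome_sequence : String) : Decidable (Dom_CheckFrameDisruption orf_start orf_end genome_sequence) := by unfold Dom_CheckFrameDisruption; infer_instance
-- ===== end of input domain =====

-- B replaces A's stateful gap-counter scan (with break) by collecting the positions of
-- retained bases and checking consecutive position jumps modulo 3 (objective: alternative).


-- ===== PORT A =====
-- the `for base in ORF_sequence` loop with the len_gap counter and break
def aGapLoop (lenGap : Int) : List Char → Bool
  | [] => false
  | base :: rest =>
    if base = '-' then aGapLoop (lenGap + 1) rest
    else if lenGap > 0 then
      if PySem.Int.mod lenGap 3 > 0 then true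
      else aGapLoop 0 rest
    else aGapLoop lenGap rest

def CheckFrameDisruption (orf_start : Int) (orf_end : Int) (genome_sequence : String) : Bool :=
  let orf := PySem.List.slice genome_sequence.toList (some (orf_start - 1)) (some orf_end)
  if PySem.List.slice orf none (some 3) ≠ "ATG".toList then true
  else if ¬ ([("TAA" : String).toList, ("TGA" : String).toList, ("TAG" : String).toList].contains
        (PySem.List.slice orf (some (-3)) none)) then true
  else if PySem.Chars.isIn ['-'] orf then aGapLoop 0 orf
  else false

-- ===== PORT B =====
-- pos = [i for i, base in enumerate(orf) if base != '-']
def altPositions (orf : List Char) : List Int :=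
  ((PySem.List.enumerate orf).filter (fun p => p.2 != '-')).map (fun p => p.1)

def CheckFrameDisruption_alt (orf_start : Int) (orf_end : Int) (genome_sequence : String) : Bool :=
  let orf := PySem.List.slice genome_sequence.toList (some (orf_start - 1)) (some orf_end)
  if PySem.List.slice orf none (some 3) ≠ "ATG".toList then true
  else if ¬ ([("TAA" : String).toList, ("TGA" : String).toList, ("TAG" : String).toList].contains
        (PySem.List.slice orf (some (-3)) none)) then true
  else
    let pos := altPositions orf
    (List.zip ((-1 : Int) :: pos) pos).any (fun p => PySem.Int.mod (p.2 - p.1) 3 != 1)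

-- ===== PRECONDITION & SPEC =====
def Spec_CheckFrameDisruption (orf_start : Int) (orf_end : Int) (genome_sequence : String) (out : Bool) : Prop := out = CheckFrameDisruption_alt orf_start orf_end genome_sequence
instance (orf_start : Int) (orf_end : Int) (genome_sequence : String) (out : Bool) : Decidable (Spec_CheckFrameDisruption orf_start orf_end genome_sequence out) := by unfold Spec_CheckFrameDisruption; infer_instance

-- ===== CLAIM (what is proved, stated in full; the proofs are below) =====
def Claim_equal_CheckFrameDisruption : Prop := ∀ (orf_start : Int) (orf_end : Int) (genome_sequence : String), Dom_CheckFrameDisruption orf_start orf_end genome_sequence → Spec_CheckFrameDisruption orf_start orf_end genome_sequence (CheckFrameDisruption orf_start orf_end genome_sequence)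

-- ===== LEMMAS AND PROOFS =====

-- positions of non-'-' characters of s, indexing from k (altPositions orf = posFrom 0 orf)
def posFrom (k : Int) (s : List Char) : List Int :=
  ((PySem.List.enumerate s k).filter (fun p => p.2 != '-')).map (fun p => p.1)

theorem altPositions_eq_posFrom (s : List Char) : altPositions s = posFrom 0 s := rfl

theorem posFrom_cons_gap (k : Int) (rest : List Char) :
    posFrom k ('-' :: rest) = posFrom (k + 1) rest := by
  simp [posFrom, PySem.List.enumerate_cons]

theorem posFrom_cons_keep (k : Int) (c : Char) (rest : List Char) (hc : c ≠ '-') :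
    posFrom k (c :: rest) = k :: posFrom (k + 1) rest := by
  simp [posFrom, PySem.List.enumerate_cons, hc]

theorem loop_eq (s : List Char) : ∀ (prev k : Int), prev < k →
    aGapLoop (k - prev - 1) s
      = (List.zip (prev :: posFrom k s) (posFrom k s)).any
          (fun p => PySem.Int.mod (p.2 - p.1) 3 != 1) := by
  induction s with
  | nil => intro prev k _; simp [aGapLoop, posFrom, PySem.List.enumerate]
  | cons c rest ih =>
    intro prev k hpk
    by_cases hc : c = '-'
    · subst hc
      rw [posFrom_cons_gap]
      have h1 : aGapLoop (k - prev - 1) ('-' :: rest) = aGapLoop (k - prev - 1 + 1) rest := by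
        simp [aGapLoop]
      rw [h1, show k - prev - 1 + 1 = (k + 1) - prev - 1 by ring]
      exact ih prev (k + 1) (by omega)
    · rw [posFrom_cons_keep k c rest hc, List.zip_cons_cons, List.any_cons]
      have hmod : PySem.Int.mod (k - prev) 3 = (k - prev) % 3 :=
        PySem.Int.mod_eq_emod_of_pos (by norm_num)
      have hmod2 : PySem.Int.mod (k - prev - 1) 3 = (k - prev - 1) % 3 :=
        PySem.Int.mod_eq_emod_of_pos (by norm_num)
      have hih := ih k (k + 1) (by omega)
      rw [show (k + 1 : Int) - k - 1 = 0 by ring] at hih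
      by_cases hbad : (k - prev - 1) % 3 > 0
      · have hg : k - prev - 1 > 0 := by omega
        have hA : aGapLoop (k - prev - 1) (c :: rest) = true := by
          simp only [aGapLoop, if_neg hc, if_pos hg, hmod2]
          rw [if_pos hbad]
        have hfst' : ((PySem.Int.mod (k - prev) 3) != 1) = true := by
          rw [hmod]; simp only [bne_iff_ne, ne_eq]; omega
        rw [hA]
        show true = ((PySem.Int.mod (k - prev) 3 != 1) || _)
        rw [hfst']
        simp
      · have h0 : (k - prev - 1) % 3 = 0 := by omega
        have hfst : ((PySem.Int.mod (k - prev) 3) != 1) = false := by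
          rw [hmod]
          simp only [bne_eq_false_iff_eq]
          omega
        have hA : aGapLoop (k - prev - 1) (c :: rest) = aGapLoop 0 rest := by
          by_cases hg : k - prev - 1 > 0
          · simp only [aGapLoop, if_neg hc, if_pos hg, hmod2]
            rw [if_neg (by omega : ¬ (k - prev - 1) % 3 > 0)]
          · have hz : k - prev - 1 = 0 := by omega
            rw [hz]
            simp [aGapLoop, hc]
        rw [hA, hih]
        show _ = ((PySem.Int.mod (k - prev) 3 != 1) || _)
        rw [hfst]
        simp

theorem aGapLoop_of_no_gap (s : List Char) (h : ∀ c ∈ s, c ≠ '-') :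
    aGapLoop 0 s = false := by
  induction s with
  | nil => simp [aGapLoop]
  | cons c rest ih =>
    have hc : c ≠ '-' := h c (by simp)
    simp [aGapLoop, hc]
    exact ih (fun d hd => h d (by simp [hd]))

theorem loop_eq_zero (s : List Char) :
    aGapLoop 0 s
      = (List.zip ((-1 : Int) :: altPositions s) (altPositions s)).any
          (fun p => PySem.Int.mod (p.2 - p.1) 3 != 1) := by
  have h := loop_eq s (-1) 0 (by norm_num)
  rw [show (0 : Int) - (-1) - 1 = 0 by ring] at h
  rw [h, altPositions_eq_posFrom]

-- ===== VERDICT (by name: the statement is the Claim_ definition above) =====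
theorem CheckFrameDisruption_spec : Claim_equal_CheckFrameDisruption := by
  intro orf_start orf_end genome_sequence _
  unfold Spec_CheckFrameDisruption CheckFrameDisruption CheckFrameDisruption_alt
  dsimp only
  set orf := PySem.List.slice genome_sequence.toList (some (orf_start - 1)) (some orf_end) with horf
  split_ifs with h1 h2 h3
  · rfl
  · exact loop_eq_zero orf
  · rw [← loop_eq_zero]
    refine ((aGapLoop_of_no_gap orf ?_).symm : _)
    intro c hc hceq
    subst hceq
    obtain ⟨s1, s2, hsplit⟩ := List.append_of_mem hc
    exact h3 ((PySem.Chars.isIn_iff_infix ['-'] orf).mpr ⟨s1, s2, by rw [hsplit]; simp⟩)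
  · rfl
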